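-- pv_equiv track=rewrite | github.com/wpowen/bestseller | src/bestseller/services/scorecard.py | _chapter_gap_count
-- ===== SOURCE A (Python) =====
-- from typing import Any, Iterable, Mapping, Sequence
--
-- def _chapter_gap_count(
--     chapter_numbers: Sequence[int], expected_count: int | None = None
-- ) -> int:
--     """Count missing chapters inside the sequence.
--
--     Missing = gap between successive chapter_no values plus (if
--     ``expected_count`` is given) shortfall from the expected total.
--     """
--
--     if not chapter_numbers:
--         return 0 if expected_count is None else max(0, expected_count)
--     ordered = sorted(chapter_numbers)
--     # In-sequence gaps.
--     gap = 0
--     for prev, nxt in zip(ordered, ordered[1:]):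
--         if nxt > prev + 1:
--             gap += nxt - prev - 1
--     # Shortfall vs expected_count.
--     if expected_count is not None and expected_count > ordered[-1]:
--         gap += expected_count - ordered[-1]
--     return gap
-- ===== SOURCE B (Python) =====
-- def _chapter_gap_count(chapter_numbers, expected_count=None):
--     """Closed form: missing-in-span = span size minus distinct count; no sorting."""
--     if not chapter_numbers:
--         return 0 if expected_count is None else max(0, expected_count)
--     lo = min(chapter_numbers)
--     hi = max(chapter_numbers)
--     gap = (hi - lo + 1) - len(set(chapter_numbers))
--     if expected_count is not None and expected_count > hi:
--         gap += expected_count - hi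
--     return gap
-- ===== Notes on version B (the rewrite author's own statement) =====
-- stated objective: faster
-- what changed: Replaces sort-then-scan over successive pairs by a closed form: internal missing = (max - min + 1) - len(set(xs)), computed with min/max/set in one pass and no sort.
import Mathlib
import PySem

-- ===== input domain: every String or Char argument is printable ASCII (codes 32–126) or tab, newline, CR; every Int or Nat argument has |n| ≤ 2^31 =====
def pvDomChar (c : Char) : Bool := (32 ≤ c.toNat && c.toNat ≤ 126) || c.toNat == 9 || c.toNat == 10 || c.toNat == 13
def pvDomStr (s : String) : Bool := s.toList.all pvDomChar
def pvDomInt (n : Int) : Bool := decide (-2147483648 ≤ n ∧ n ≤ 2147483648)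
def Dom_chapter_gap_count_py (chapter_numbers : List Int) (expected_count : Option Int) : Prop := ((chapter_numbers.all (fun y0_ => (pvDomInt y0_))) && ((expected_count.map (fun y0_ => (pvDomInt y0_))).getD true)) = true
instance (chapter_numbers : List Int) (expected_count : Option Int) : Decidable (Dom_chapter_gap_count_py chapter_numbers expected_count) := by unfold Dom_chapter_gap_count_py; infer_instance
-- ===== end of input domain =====

-- B replaces A's sort-then-scan gap sum by the closed form (max - min + 1) - |set(xs)|: faster (no sort).


-- ===== PORT A =====
-- literal port of A: sort, fold over zip(ordered, ordered[1:]) accumulating gaps, then shortfall vs ordered[-1]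
def chapter_gap_count_py (chapter_numbers : List Int) (expected_count : Option Int) : Int :=
  if chapter_numbers = [] then
    match expected_count with
    | none => 0
    | some e => max 0 e
  else
    let ordered := PySem.List.sorted chapter_numbers (fun x => x) false
    let gap := (ordered.zip (PySem.List.slice ordered (some 1) none)).foldl
      (fun g p => if p.2 > p.1 + 1 then g + (p.2 - p.1 - 1) else g) 0
    match expected_count with
    | some e =>
        -- ordered[-1]; ordered is nonempty here so pyGet? is some and the default is never used
        let lastv := (PySem.List.pyGet? ordered (-1)).getD 0
        if e > lastv then gap + (e - lastv) else gap
    | none => gap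

-- ===== PORT B =====
-- literal port of B: min, max, set cardinality, closed-form span count, then shortfall vs max
def chapter_gap_count_py_alt (chapter_numbers : List Int) (expected_count : Option Int) : Int :=
  if chapter_numbers = [] then
    match expected_count with
    | none => 0
    | some e => max 0 e
  else
    -- min/max of a nonempty list are some; the default is never used
    let lo := (PySem.List.min? chapter_numbers (fun x => x)).getD 0
    let hi := (PySem.List.max? chapter_numbers (fun x => x)).getD 0
    let gap := (hi - lo + 1) - PySem.Set.len (PySem.Set.ofList chapter_numbers)
    match expected_count with
    | some e => if e > hi then gap + (e - hi) else gap
    | none => gap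

-- ===== PRECONDITION & SPEC =====
def Spec_chapter_gap_count_py (chapter_numbers : List Int) (expected_count : Option Int) (out : Int) : Prop := out = chapter_gap_count_py_alt chapter_numbers expected_count
instance (chapter_numbers : List Int) (expected_count : Option Int) (out : Int) : Decidable (Spec_chapter_gap_count_py chapter_numbers expected_count out) := by unfold Spec_chapter_gap_count_py; infer_instance

-- ===== CLAIM (what is proved, stated in full; the proofs are below) =====
def Claim_equal_chapter_gap_count_py : Prop := ∀ (chapter_numbers : List Int) (expected_count : Option Int), Dom_chapter_gap_count_py chapter_numbers expected_count → Spec_chapter_gap_count_py chapter_numbers expected_count (chapter_gap_count_py chapter_numbers expected_count)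

-- ===== LEMMAS AND PROOFS =====

-- A's gap fold, with the accumulator pulled out as a sum of per-pair contributions
theorem gap_foldl_eq_sum (l : List (Int × Int)) (g : Int) :
    l.foldl (fun g p => if p.2 > p.1 + 1 then g + (p.2 - p.1 - 1) else g) g
      = g + (l.map (fun p => if p.2 > p.1 + 1 then p.2 - p.1 - 1 else 0)).sum := by
  induction l generalizing g with
  | nil => simp
  | cons p t ih =>
      simp only [List.foldl_cons, List.map_cons, List.sum_cons, ih]
      split_ifs <;> ring

-- in a ≤-sorted list every element is at most the last one
theorem pairwise_le_getLast (l : List Int) (h : l ≠ []) (hp : l.Pairwise (· ≤ ·)) :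
    ∀ y ∈ l, y ≤ l.getLast h := by
  induction l with
  | nil => simp at h
  | cons a t ih =>
      intro y hy
      obtain ⟨h1, h2⟩ := List.pairwise_cons.mp hp
      cases t with
      | nil => simp at hy; simp [hy]
      | cons b t' =>
          rw [List.getLast_cons (by simp)]
          rcases List.mem_cons.mp hy with rfl | hy'
          · exact le_trans (h1 b (by simp)) (ih (by simp) h2 b (by simp))
          · exact ih (by simp) h2 _ hy'

-- |set(l)| = |l.toFinset| (distinct count)
theorem ofList_length_eq_card (l : List Int) :
    ((PySem.Set.ofList l).length : Int) = (l.toFinset.card : Int) := by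
  have hperm : (PySem.Set.ofList l).Perm l.dedup :=
    (List.perm_ext_iff_of_nodup (PySem.Set.nodup_ofList l) l.nodup_dedup).mpr
      (by simp [PySem.Set.mem_ofList])
  rw [List.card_toFinset, hperm.length_eq]

-- core identity: on a sorted nonempty list, A's gap sum is span size minus distinct count
theorem gap_core : ∀ (t : List Int) (a : Int), (a :: t).Pairwise (· ≤ ·) →
    (((a :: t).zip t).map (fun p : Int × Int => if p.2 > p.1 + 1 then p.2 - p.1 - 1 else 0)).sum
      = ((a :: t).getLast (by simp) - a + 1) - ((a :: t).toFinset.card : Int) := by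
  intro t
  induction t with
  | nil => intro a _; simp
  | cons b t' ih =>
      intro a hp
      obtain ⟨h1, h2⟩ := List.pairwise_cons.mp hp
      have hab : a ≤ b := h1 _ (by simp)
      have hb : ∀ x ∈ b :: t', b ≤ x := by
        intro x hx
        rcases List.mem_cons.mp hx with rfl | hx'
        · exact le_refl _
        · exact (List.pairwise_cons.mp h2).1 _ hx'
      have hlast : (a :: b :: t').getLast (by simp) = (b :: t').getLast (by simp) :=
        List.getLast_cons (by simp)
      have hih := ih b h2
      simp only [List.zip_cons_cons, List.map_cons, List.sum_cons] at *
      rw [hlast, hih]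
      by_cases hmem : a ∈ b :: t'
      · have : a = b := le_antisymm hab (hb a hmem)
        subst this
        have : (a :: a :: t').toFinset = (a :: t').toFinset := by simp
        rw [this]
        simp
      · have : (a :: b :: t').toFinset.card = (b :: t').toFinset.card + 1 := by
          simp only [List.toFinset_cons]
          rw [Finset.card_insert_of_notMem (by simpa using hmem)]
        rw [this]
        have hlt : a < b := lt_of_le_of_ne hab (fun h => hmem (h ▸ List.mem_cons_self))
        push_cast
        split_ifs with h <;> omega

-- the head of sorted(xs) is min(xs)
theorem min_eq_head (xs : List Int) (a : Int) (t : List Int)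
    (hs : PySem.List.sorted xs (fun x => x) false = a :: t) :
    PySem.List.min? xs (fun x => x) = some a := by
  have hne : xs ≠ [] := by
    intro h; subst h; simp [PySem.List.sorted] at hs
  obtain ⟨m, hm⟩ : ∃ m, PySem.List.min? xs (fun x => x) = some m := by
    cases h : PySem.List.min? xs (fun x => x) with
    | none => exact absurd ((PySem.List.min?_eq_none_iff xs _).mp h) hne
    | some m => exact ⟨m, rfl⟩
  have hma : a ∈ xs := (PySem.List.sorted_perm xs (fun x => x) false).mem_iff.mp (hs ▸ List.mem_cons_self)
  have h1 : m ≤ a := PySem.List.min?_isMin hm a hma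
  have h2 : a ≤ m := PySem.List.key_head_sorted_le xs (fun x => x) hs m (PySem.List.min?_mem hm)
  rw [hm, le_antisymm h2 h1]

-- the last element of sorted(xs) is max(xs)
theorem max_eq_getLast (xs : List Int) (a : Int) (t : List Int)
    (hs : PySem.List.sorted xs (fun x => x) false = a :: t) :
    PySem.List.max? xs (fun x => x) = some ((a :: t).getLast (by simp)) := by
  have hne : xs ≠ [] := by
    intro h; subst h; simp [PySem.List.sorted] at hs
  obtain ⟨M, hM⟩ : ∃ M, PySem.List.max? xs (fun x => x) = some M := by
    cases h : PySem.List.max? xs (fun x => x) with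
    | none => exact absurd ((PySem.List.max?_eq_none_iff xs _).mp h) hne
    | some M => exact ⟨M, rfl⟩
  have hperm := PySem.List.sorted_perm xs (fun x => x) false
  have hpw : (a :: t).Pairwise (· ≤ ·) := by
    have := PySem.List.sorted_pairwise xs (fun x => x)
    rwa [hs] at this
  have hlmem : (a :: t).getLast (by simp) ∈ xs := by
    exact (hs ▸ hperm).mem_iff.mp (List.getLast_mem _)
  have h1 : (a :: t).getLast (by simp) ≤ M := PySem.List.max?_isMax hM _ hlmem
  have h2 : M ≤ (a :: t).getLast (by simp) := by
    have hMmem : M ∈ a :: t := (hs ▸ hperm).mem_iff.mpr (PySem.List.max?_mem hM)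
    exact pairwise_le_getLast _ (by simp) hpw M hMmem
  rw [hM, le_antisymm h2 h1]

-- ordered[-1] on a nonempty list is its last element
theorem pyGet_neg_one (l : List Int) (h : l ≠ []) :
    (PySem.List.pyGet? l (-1)).getD 0 = l.getLast h := by
  simp only [PySem.List.pyGet?, PySem.List.pyIdx?, Int.reduceNeg, Int.neg_nonneg, Int.reduceLE,
    ↓reduceIte, neg_le_neg_iff, Nat.one_le_cast, neg_neg, Int.toNat_one]
  have h1 : 1 ≤ l.length := List.length_pos_iff.mpr h
  have h2 : l.length - 1 < l.length := by omega
  simp [h1, List.getLast_eq_getElem, List.getElem?_eq_getElem h2]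

-- ===== VERDICT (by name: the statement is the Claim_ definition above) =====
theorem chapter_gap_count_py_spec : Claim_equal_chapter_gap_count_py := by
  intro xs ec _
  unfold Spec_chapter_gap_count_py chapter_gap_count_py chapter_gap_count_py_alt
  by_cases hne : xs = []
  · simp [hne]
  · simp only [hne, ite_false]
    obtain ⟨a, t, hs⟩ : ∃ a t, PySem.List.sorted xs (fun x => x) false = a :: t := by
      cases h : PySem.List.sorted xs (fun x => x) false with
      | nil => exact absurd ((PySem.List.sorted_eq_nil_iff xs _ _).mp h) hne
      | cons a t => exact ⟨a, t, rfl⟩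
    have hpw : (a :: t).Pairwise (· ≤ ·) := by
      have := PySem.List.sorted_pairwise xs (fun x => x)
      rwa [hs] at this
    have hslice : PySem.List.slice (a :: t) (some 1) none = t := by
      rw [PySem.List.slice_from _ (by norm_num)]; simp
    have hperm : (a :: t).Perm xs := hs ▸ PySem.List.sorted_perm xs (fun x => x) false
    have hcard : (PySem.Set.len (PySem.Set.ofList xs) : Int) = ((a :: t).toFinset.card : Int) := by
      show ((PySem.Set.ofList xs).length : Int) = _
      rw [ofList_length_eq_card]
      congr 2
      exact Finset.ext fun y => by
        simp only [List.mem_toFinset]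
        exact hperm.mem_iff.symm
    have hgap :
        ((a :: t).zip (PySem.List.slice (a :: t) (some 1) none)).foldl
          (fun g p => if p.2 > p.1 + 1 then g + (p.2 - p.1 - 1) else g) 0
        = ((a :: t).getLast (by simp) - a + 1) - ((a :: t).toFinset.card : Int) := by
      rw [hslice, gap_foldl_eq_sum, gap_core t a hpw]; ring
    rw [hs, min_eq_head xs a t hs, max_eq_getLast xs a t hs]
    simp only [Option.getD_some]
    cases ec with
    | none => rw [hgap, hcard]
    | some e =>
        rw [pyGet_neg_one (a :: t) (by simp), hgap, hcard]
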